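-- pv_equiv track=rewrite | github.com/markmcwiggins/experian | common_letters.py | find_common_letters
-- ===== SOURCE A (Python) =====
-- def find_common_letters(words):
--     if not words:
--         return None
--
--     common_letters = set(words[0])
--
--     for word in words[1:]:
--         common_letters.intersection_update(word)
--
--     if common_letters:
--         return ''.join(sorted(common_letters))
--     else:
--         return None
-- ===== SOURCE B (Python) =====
-- def find_common_letters(words):
--     if not words:
--         return None
--     counts = {}
--     for word in words:
--         for ch in dict.fromkeys(word):
--             counts[ch] = counts.get(ch, 0) + 1
--     common = [ch for ch, c in counts.items() if c == len(words)]
--     if common: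
--         return ''.join(sorted(common))
--     return None
-- ===== Notes on version B (the rewrite author's own statement) =====
-- stated objective: alternative
-- what changed: Replaces the incremental set-intersection reduction with a counting index: one pass builds a dict mapping each letter to the number of words containing it, then letters whose count equals len(words) are collected and sorted.
import Mathlib
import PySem

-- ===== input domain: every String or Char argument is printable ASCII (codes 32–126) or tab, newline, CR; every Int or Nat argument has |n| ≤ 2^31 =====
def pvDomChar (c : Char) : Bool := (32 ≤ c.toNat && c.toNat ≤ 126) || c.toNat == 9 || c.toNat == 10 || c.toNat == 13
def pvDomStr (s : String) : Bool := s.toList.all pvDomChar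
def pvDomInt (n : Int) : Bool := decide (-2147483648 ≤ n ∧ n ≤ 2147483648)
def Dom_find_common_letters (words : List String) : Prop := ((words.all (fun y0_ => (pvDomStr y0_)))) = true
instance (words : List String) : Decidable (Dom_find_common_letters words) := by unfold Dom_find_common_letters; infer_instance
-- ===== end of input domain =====

-- B replaces A's incremental set-intersection with a per-letter word-count index; alternative decomposition, same result.

-- ===== PORT A =====
def find_common_letters (words : List String) : Option String :=
  match words with
  | [] => none
  | w0 :: rest =>
    -- common_letters = set(words[0]); for word in words[1:]: common_letters.intersection_update(word)
    let common : PySem.Set Char :=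
      rest.foldl (fun s word => PySem.Set.inter s word.toList) (PySem.Set.ofList w0.toList)
    if common.isEmpty then none
    else some (String.ofList (PySem.List.sorted common (fun c => c) false))

-- ===== PORT B =====
def find_common_letters_alt (words : List String) : Option String :=
  match words with
  | [] => none
  | _ :: _ =>
    let counts : PySem.Dict Char Int :=
      words.foldl (fun d word =>
        (PySem.List.dedup word.toList).foldl (fun d ch => PySem.Dict.modify d ch 0 (· + 1)) d)
        PySem.Dict.empty
    let common : List Char :=
      (counts.items.filter (fun p => p.2 == (words.length : Int))).map Prod.fst
    if common.isEmpty then none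
    else some (String.ofList (PySem.List.sorted common (fun c => c) false))

-- ===== PRECONDITION & SPEC =====
def Spec_find_common_letters (words : List String) (out : Option String) : Prop := out = find_common_letters_alt words
instance (words : List String) (out : Option String) : Decidable (Spec_find_common_letters words out) := by unfold Spec_find_common_letters; infer_instance

-- ===== CLAIM (what is proved, stated in full; the proofs are below) =====
def Claim_equal_find_common_letters : Prop := ∀ (words : List String), Dom_find_common_letters words → Spec_find_common_letters words (find_common_letters words)

-- ===== LEMMAS AND PROOFS =====

-- the multiset of "one occurrence per (word, letter-of-word)" that B's double loop counts
def pvL (words : List String) : List Char := words.flatMap (fun w => PySem.List.dedup w.toList)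

theorem pv_foldl_flatMap {α β γ : Type} (l : List α) (f : α → List β) (g : γ → β → γ) (init : γ) :
    (l.flatMap f).foldl g init = l.foldl (fun c a => (f a).foldl g c) init := by
  induction l generalizing init with
  | nil => rfl
  | cons x xs ih => simp [List.flatMap_cons, List.foldl_append, ih]

theorem pv_counts_eq (words : List String) :
    words.foldl (fun d word =>
        (PySem.List.dedup word.toList).foldl (fun d ch => PySem.Dict.modify d ch 0 (· + 1)) d)
        PySem.Dict.empty
      = PySem.Dict.counter (pvL words) := by
  rw [PySem.Dict.counter_eq_foldl, pvL, pv_foldl_flatMap]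

theorem pv_count_L (words : List String) (c : Char) :
    (pvL words).count c = (words.filter (fun w => decide (c ∈ w.toList))).length := by
  induction words with
  | nil => rfl
  | cons w ws ih =>
    simp only [pvL, List.flatMap_cons, List.count_append, List.filter_cons]
    by_cases h : c ∈ w.toList
    · rw [List.count_eq_one_of_mem (PySem.List.nodup_dedup _) (by simpa using h)]
      simp [h, ← ih, pvL, Nat.add_comm]
    · rw [List.count_eq_zero_of_not_mem (by simpa using h)]
      simp [h, ← ih, pvL]

theorem pv_memA (rest : List String) (s : PySem.Set Char) (c : Char) :
    c ∈ rest.foldl (fun s word => PySem.Set.inter s word.toList) s ↔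
      c ∈ s ∧ ∀ w ∈ rest, c ∈ w.toList := by
  induction rest generalizing s with
  | nil => simp
  | cons w ws ih =>
    simp only [List.foldl_cons, ih, PySem.Set.mem_inter, List.mem_cons, forall_eq_or_imp]
    tauto

theorem pv_nodupA (rest : List String) (s : PySem.Set Char) (h : s.Nodup) :
    (rest.foldl (fun s word => PySem.Set.inter s word.toList) s).Nodup := by
  induction rest generalizing s with
  | nil => exact h
  | cons w ws ih => exact ih _ (PySem.Set.nodup_inter _ _ h)

-- B's collected list, rewritten through the counter lemmas
theorem pv_commonB_eq (words : List String) :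
    (((PySem.Dict.counter (pvL words)).items.filter
        (fun p => p.2 == (words.length : Int))).map Prod.fst)
      = (PySem.Set.ofList (pvL words)).filter
          (fun k => ((pvL words).count k : Int) == (words.length : Int)) := by
  rw [PySem.Dict.items_counter, List.filter_map]
  simp [Function.comp_def]

theorem pv_memB (words : List String) (c : Char) :
    (c ∈ (PySem.Set.ofList (pvL words)).filter
        (fun k => ((pvL words).count k : Int) == (words.length : Int))) ↔
      (c ∈ pvL words ∧ (pvL words).count c = words.length) := by
  simp [List.mem_filter, PySem.Set.mem_ofList]

theorem pv_filter_len (words : List String) (c : Char) :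
    (words.filter (fun w => decide (c ∈ w.toList))).length = words.length ↔
      ∀ w ∈ words, c ∈ w.toList := by
  constructor
  · intro h w hw
    simpa using List.length_filter_eq_length_iff.mp h w hw
  · intro h
    exact List.length_filter_eq_length_iff.mpr (fun w hw => by simpa using h w hw)

theorem pv_mem_L (words : List String) (c : Char) :
    c ∈ pvL words ↔ ∃ w ∈ words, c ∈ w.toList := by
  simp [pvL]

-- ===== VERDICT (by name: the statement is the Claim_ definition above) =====
theorem find_common_letters_spec : Claim_equal_find_common_letters := by
  intro words _
  unfold Spec_find_common_letters find_common_letters find_common_letters_alt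
  match words with
  | [] => rfl
  | w0 :: rest =>
    simp only
    rw [pv_counts_eq, pv_commonB_eq]
    set A := rest.foldl (fun s word => PySem.Set.inter s word.toList) (PySem.Set.ofList w0.toList) with hA
    set B := (PySem.Set.ofList (pvL (w0 :: rest))).filter
        (fun k => ((pvL (w0 :: rest)).count k : Int) == ((w0 :: rest).length : Int)) with hB
    have hmem : ∀ c, c ∈ A ↔ c ∈ B := by
      intro c
      rw [hA, hB, pv_memA, pv_memB, PySem.Set.mem_ofList, pv_count_L, pv_filter_len]
      constructor
      · rintro ⟨h0, hall⟩
        have hall' : ∀ w ∈ w0 :: rest, c ∈ w.toList := by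
          intro w hw; rcases List.mem_cons.mp hw with rfl | hw
          · exact h0
          · exact hall w hw
        exact ⟨(pv_mem_L _ c).mpr ⟨w0, List.mem_cons_self, h0⟩, hall'⟩
      · rintro ⟨_, hall⟩
        exact ⟨hall w0 List.mem_cons_self, fun w hw => hall w (List.mem_cons_of_mem _ hw)⟩
    have hperm : A.Perm B := by
      refine (List.perm_ext_iff_of_nodup ?_ ?_).mpr hmem
      · exact pv_nodupA _ _ (PySem.Set.nodup_ofList _)
      · exact (PySem.Set.nodup_ofList _).filter _
    have hempty : A.isEmpty = B.isEmpty := by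
      rw [Bool.eq_iff_iff]
      simp only [List.isEmpty_iff, ← List.length_eq_zero_iff, hperm.length_eq]
    have hsorted : PySem.List.sorted A (fun c => c) false = PySem.List.sorted B (fun c => c) false :=
      PySem.List.sorted_eq_sorted_of_perm _ _ _ (fun _ _ h => h) hperm
    rw [hempty, hsorted]
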